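-- pv_equiv track=rewrite | github.com/jdonat/MightyPython | script.py | long_asc
-- ===== SOURCE A (Python) =====
-- def long_asc(liste):
--    coord_start = []
--    coord_end = []
--    start = end = long = last = next = 0
--    for x in range(len(liste)):
--       start = x
--       last = liste[x]
--       next = last +1
--       if(x < len(liste)-1):
--          for y in range(start+1, len(liste)):
--             if(liste[y] == next):
--                long += 1
--                last = liste[y]
--                next = last + 1
--                end = y
--             else:
--                long = 0
--                coord_start.append(start)
--                coord_end.append(end)
--                break
--    ind = 0
--    longueur = []
--    long = 0
--    for x in range(len(coord_start)):
--       longueur.append(coord_end[x]-coord_start[x])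
--    for x in range(len(longueur)):
--       if(longueur[x] > long):
--          long = longueur[x]
--          ind = x
--    arr = []
--    start = coord_start[ind]
--    end = coord_end[ind]
--    for x in range(start, end+1):
--       arr.append(liste[x])
--    return arr
-- ===== SOURCE B (Python) =====
-- def long_asc(liste):
--     n = len(liste)
--     best_s = best_e = 0
--     s = 0
--     for x in range(1, n):
--         if liste[x] != liste[x-1] + 1:
--             s = x
--         if x - s > best_e - best_s:
--             best_s, best_e = s, x
--     return liste[best_s:best_e+1]
-- ===== Notes on version B (the rewrite author's own statement) =====
-- stated objective: faster
-- what changed: Replaces A's quadratic rescan of the ascending run from every index (plus a two-extra-pass coordinate/length bookkeeping with a stale 'end' variable) by a single left-to-right pass that tracks the current run start and the best window in O(1) per element.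
-- intended difference: On lists whose trailing maximal +1-run is strictly longer than every other run, A never records the run that reaches the last index and returns the best earlier run (or just the first element), while B returns that longest trailing run, which is the intended longest ascending run. — e.g. on long_asc([9, 1, 2, 3]): A returns [9], B returns [1, 2, 3]
import Mathlib
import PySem

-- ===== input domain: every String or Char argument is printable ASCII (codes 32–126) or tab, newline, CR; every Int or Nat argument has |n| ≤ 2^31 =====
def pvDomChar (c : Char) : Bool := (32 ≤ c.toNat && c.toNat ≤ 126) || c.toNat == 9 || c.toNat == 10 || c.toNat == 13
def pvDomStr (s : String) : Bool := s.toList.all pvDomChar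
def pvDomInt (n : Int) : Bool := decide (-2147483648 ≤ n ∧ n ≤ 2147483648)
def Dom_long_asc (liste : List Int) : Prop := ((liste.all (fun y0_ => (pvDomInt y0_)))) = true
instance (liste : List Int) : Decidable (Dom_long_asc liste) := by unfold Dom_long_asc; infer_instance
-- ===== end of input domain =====

-- B replaces A's quadratic per-index rescan by one linear pass tracking the current
-- run start and best window; A misses runs reaching the last index (D_) and raises
-- on fully-consecutive/empty lists (excluded by Pre_).


-- ===== PORT A =====
-- inner 'for y in range(start+1, len(liste))' loop with its break, as structural recursion
-- over the remaining index list; state (long, last, next, end, coord_start, coord_end).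
-- liste[i] is ported as liste.getD i 0: every index Python reads here is in range, so this is exact.
def innerA (liste : List Int) (ys : List ℕ) (start : ℕ) (long : ℕ) (last next : Int)
    (end_ : ℕ) (cs ce : List ℕ) : ℕ × Int × Int × ℕ × List ℕ × List ℕ :=
  match ys with
  | [] => (long, last, next, end_, cs, ce)
  | y :: ys' =>
    if liste.getD y 0 = next then
      innerA liste ys' start (long + 1) (liste.getD y 0) (liste.getD y 0 + 1) y cs ce
    else
      (0, last, next, end_, cs ++ [start], ce ++ [end_])   -- break

-- outer 'for x in range(len(liste))' loop; 'start'/'last'/'next' are reset from x each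
-- iteration (so only long, end, coord_start, coord_end thread through).
def outerA (liste : List Int) (n : ℕ) (xs : List ℕ) (long : ℕ) (end_ : ℕ)
    (cs ce : List ℕ) : ℕ × List ℕ × List ℕ :=
  match xs with
  | [] => (end_, cs, ce)
  | x :: xs' =>
    -- start = x; last = liste[x]; next = last + 1
    if x < n - 1 then
      match innerA liste (List.range' (x + 1) (n - (x + 1))) x long
              (liste.getD x 0) (liste.getD x 0 + 1) end_ cs ce with
      | (long', _, _, end', cs', ce') => outerA liste n xs' long' end' cs' ce'
    else outerA liste n xs' long end_ cs ce

-- phase 2 of A: longueur list, selection of ind, and the arr-building loop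
def longueurA (cs ce : List ℕ) : List Int :=
  (List.range cs.length).map (fun x => (ce.getD x 0 : Int) - (cs.getD x 0 : Int))

-- if longueur[x] > long: long = longueur[x]; ind = x
def selA (longueur : List Int) : Int × ℕ :=
  (List.range longueur.length).foldl
    (fun p x => if longueur.getD x 0 > p.1 then (longueur.getD x 0, x) else p) (0, 0)

-- coord_start[ind] / coord_end[ind]: Python raises IndexError when the coordinate
-- lists are empty (exactly ¬ Pre_long_asc); getD's default is never read under Pre_.
-- for x in range(start, end+1): arr.append(liste[x])
def phase2A (l : List Int) (cs ce : List ℕ) : List Int :=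
  (List.range' (cs.getD (selA (longueurA cs ce)).2 0)
    (ce.getD (selA (longueurA cs ce)).2 0 + 1 - cs.getD (selA (longueurA cs ce)).2 0)).foldl
    (fun arr x => arr ++ [l.getD x 0]) []

def long_asc (liste : List Int) : List Int :=
  phase2A liste (outerA liste liste.length (List.range liste.length) 0 0 [] []).2.1
    (outerA liste liste.length (List.range liste.length) 0 0 [] []).2.2

-- ===== PORT B =====
-- one pass: s = start of the run containing x, (bs, be) = best window so far (first strict max).
-- the single pass: s = start of the run containing x, best window (bs, be) so far
def bestB (liste : List Int) : ℕ × ℕ × ℕ :=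
  (List.range' 1 (liste.length - 1)).foldl
    (fun (st : ℕ × ℕ × ℕ) x =>
      let s := if liste.getD x 0 ≠ liste.getD (x - 1) 0 + 1 then x else st.1
      if (x : Int) - (s : Int) > (st.2.2 : Int) - (st.2.1 : Int) then (s, s, x) else (s, st.2))
    (0, 0, 0)

-- return liste[best_s : best_e + 1]
def long_asc_alt (liste : List Int) : List Int :=
  PySem.List.slice liste (some ((bestB liste).2.1 : Int))
    (some (((bestB liste).2.2 : Int) + 1))

-- ===== PRECONDITION & SPEC =====
-- +1-chain length ending at index t (for t below the length)
def ggD (liste : List Int) : ℕ → ℕ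
  | 0 => 0
  | t + 1 => if liste.getD (t + 1) 0 = liste.getD t 0 + 1 then ggD liste t + 1 else 0

-- Pre_ excludes exactly the inputs where A raises IndexError: the empty list and lists that
-- are one whole consecutive +1-run, on which A's coordinate lists stay empty.
def Pre_long_asc (liste : List Int) : Prop :=
  ∃ t < liste.length - 1, liste.getD (t + 1) 0 ≠ liste.getD t 0 + 1

instance (liste : List Int) : Decidable (Pre_long_asc liste) := by
  unfold Pre_long_asc; infer_instance

def pvWitness_long_asc : List Int := [3, 1, 2]

-- On lists whose trailing maximal +1-run is strictly longer than every other run, A never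
-- records the run reaching the last index and returns the best earlier run (or the first
-- element); B returns that longest trailing run, the intended longest ascending run.
def D_long_asc (liste : List Int) : Prop :=
  ∀ t < liste.length - 1, ggD liste t < ggD liste (liste.length - 1)

instance (liste : List Int) : Decidable (D_long_asc liste) := by
  unfold D_long_asc; infer_instance

def Spec_long_asc (liste : List Int) (out : List Int) : Prop :=
  ¬ D_long_asc liste → out = long_asc_alt liste
instance (liste : List Int) (out : List Int) : Decidable (Spec_long_asc liste out) := by
  unfold Spec_long_asc; infer_instance

def pvDiffWitness_long_asc : List Int := [9, 1, 2, 3]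
def pvDiffWitnessOut_long_asc : (List Int) × (List Int) := ([9], [1, 2, 3])

-- ===== CLAIM (what is proved, stated in full; the proofs are below) =====
def Claim_unchanged_long_asc : Prop :=
  ∀ (liste : List Int), Dom_long_asc liste → Pre_long_asc liste →
    Spec_long_asc liste (long_asc liste)
def Claim_changed_long_asc : Prop :=
  Dom_long_asc (pvDiffWitness_long_asc) ∧ Pre_long_asc (pvDiffWitness_long_asc) ∧
  D_long_asc (pvDiffWitness_long_asc) ∧
  long_asc (pvDiffWitness_long_asc) = pvDiffWitnessOut_long_asc.1 ∧
  long_asc_alt (pvDiffWitness_long_asc) = pvDiffWitnessOut_long_asc.2 ∧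
  pvDiffWitnessOut_long_asc.1 ≠ pvDiffWitnessOut_long_asc.2
def Claim_exact_long_asc : Prop :=
  ∀ (liste : List Int), Dom_long_asc liste → Pre_long_asc liste → D_long_asc liste →
    long_asc liste ≠ long_asc_alt liste

-- ===== LEMMAS AND PROOFS =====

-- bounded backward chain length (0 beyond the length), the proof-side twin of ggD
def ggA (liste : List Int) : ℕ → ℕ
  | 0 => 0
  | t + 1 =>
      if t + 1 < liste.length ∧ liste.getD (t + 1) 0 = liste.getD t 0 + 1
      then ggA liste t + 1 else 0

lemma ggD_eq_ggA {l : List Int} : ∀ t, t < l.length → ggD l t = ggA l t := by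
  intro t
  induction t with
  | zero => intro _; rfl
  | succ t ih =>
    intro ht
    rw [ggD, ggA]
    by_cases h : l.getD (t + 1) 0 = l.getD t 0 + 1
    · rw [if_pos h, if_pos ⟨ht, h⟩, ih (by omega)]
    · rw [if_neg h, if_neg (by intro hc; exact h hc.2)]

-- forward +1-chain length starting at x
def ffA (l : List Int) (x : ℕ) : ℕ :=
  if h : x + 1 < l.length ∧ l.getD (x + 1) 0 = l.getD x 0 + 1
  then ffA l (x + 1) + 1 else 0
termination_by l.length - x
decreasing_by omega

lemma ffA_succ {l : List Int} {x : ℕ}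
    (h : x + 1 < l.length ∧ l.getD (x + 1) 0 = l.getD x 0 + 1) :
    ffA l x = ffA l (x + 1) + 1 := by rw [ffA, dif_pos h]

lemma ffA_zero {l : List Int} {x : ℕ}
    (h : ¬ (x + 1 < l.length ∧ l.getD (x + 1) 0 = l.getD x 0 + 1)) :
    ffA l x = 0 := by rw [ffA, dif_neg h]

lemma ffA_adj {l : List Int} : ∀ {k x : ℕ}, k < ffA l x →
    x + k + 1 < l.length ∧ l.getD (x + k + 1) 0 = l.getD (x + k) 0 + 1 := by
  intro k
  induction k with
  | zero =>
    intro x hk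
    by_cases h : x + 1 < l.length ∧ l.getD (x + 1) 0 = l.getD x 0 + 1
    · simpa using h
    · rw [ffA_zero h] at hk; omega
  | succ k ih =>
    intro x hk
    by_cases h : x + 1 < l.length ∧ l.getD (x + 1) 0 = l.getD x 0 + 1
    · rw [ffA_succ h] at hk
      have := ih (x := x + 1) (by omega)
      refine ⟨by omega, ?_⟩
      rw [show x + (k + 1) + 1 = x + 1 + k + 1 by omega,
          show x + (k + 1) = x + 1 + k by omega]
      exact this.2
    · rw [ffA_zero h] at hk; omega

lemma ffA_lt {l : List Int} {x : ℕ} (hx : x < l.length) : x + ffA l x < l.length := by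
  rcases Nat.eq_zero_or_pos (ffA l x) with h | h
  · omega
  · have := ffA_adj (l := l) (k := ffA l x - 1) (x := x) (by omega)
    omega

lemma ffA_ge_chain {l : List Int} : ∀ {m x : ℕ},
    (∀ j < m, x + j + 1 < l.length ∧ l.getD (x + j + 1) 0 = l.getD (x + j) 0 + 1) →
    m ≤ ffA l x := by
  intro m
  induction m with
  | zero => intro x _; omega
  | succ m ih =>
    intro x hc
    have h0 := hc 0 (by omega)
    simp only [Nat.add_zero] at h0
    have : m ≤ ffA l (x + 1) := by
      apply ih; intro j hj
      have := hc (j + 1) (by omega)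
      rw [show x + (j + 1) + 1 = x + 1 + j + 1 by omega,
          show x + (j + 1) = x + 1 + j by omega] at this
      exact this
    rw [ffA_succ h0]; omega

lemma ggA_le {l : List Int} : ∀ t, ggA l t ≤ t := by
  intro t
  induction t with
  | zero => simp [ggA]
  | succ t ih =>
    rw [ggA]
    split
    · omega
    · omega

lemma ggA_succ {l : List Int} {t : ℕ}
    (h : t + 1 < l.length ∧ l.getD (t + 1) 0 = l.getD t 0 + 1) :
    ggA l (t + 1) = ggA l t + 1 := by rw [ggA, if_pos h]

lemma ggA_succ_zero {l : List Int} {t : ℕ}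
    (h : ¬ (t + 1 < l.length ∧ l.getD (t + 1) 0 = l.getD t 0 + 1)) :
    ggA l (t + 1) = 0 := by rw [ggA, if_neg h]

-- backward chain: k ≤ ggA t gives the adjacency at t-k-1 (for k < ggA t)
lemma ggA_back {l : List Int} {t : ℕ} : ∀ {k : ℕ}, k ≤ ggA l t →
    ggA l (t - k) = ggA l t - k ∧
    (∀ j < k, t - j < l.length ∧ l.getD (t - j) 0 = l.getD (t - j - 1) 0 + 1) := by
  intro k
  induction k with
  | zero => intro _; simp
  | succ k ih =>
    intro hk
    obtain ⟨h1, h2⟩ := ih (by omega)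
    have hgt : 1 ≤ ggA l (t - k) := by omega
    have htk : 1 ≤ t - k := by
      by_contra h
      have : t - k = 0 := by omega
      rw [this] at hgt; simp [ggA] at hgt
    -- t - k = (t - k - 1) + 1, use the def of ggA there
    have he : t - k = (t - k - 1) + 1 := by omega
    have hcond : (t - k - 1) + 1 < l.length ∧
        l.getD ((t - k - 1) + 1) 0 = l.getD (t - k - 1) 0 + 1 := by
      by_contra hc
      have := ggA_succ_zero (l := l) hc
      rw [← he] at this; omega
    have hstep : ggA l (t - k) = ggA l (t - k - 1) + 1 := by
      rw [he, ggA_succ hcond]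
      norm_num

    constructor
    · have : t - (k + 1) = t - k - 1 := by omega
      rw [this]; omega
    · intro j hj
      rcases Nat.lt_or_ge j k with h | h
      · exact h2 j h
      · have hjk : j = k := by omega
        subst hjk
        have e1 : t - j = (t - j - 1) + 1 := by omega
        constructor
        · rw [e1]; exact hcond.1
        · rw [e1]; exact hcond.2

-- the run containing t: if the chain breaks after t, the forward length from t - ggA t is ggA t
lemma ffA_of_break {l : List Int} {t : ℕ}
    (hbreak : ¬ (t + 1 < l.length ∧ l.getD (t + 1) 0 = l.getD t 0 + 1)) :
    ffA l (t - ggA l t) = ggA l t := by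
  set M := ggA l t with hM
  have hMt : M ≤ t := hM ▸ ggA_le t
  obtain ⟨_, hchain⟩ := ggA_back (l := l) (t := t) (k := M) (le_refl _)
  have hge : M ≤ ffA l (t - M) := by
    apply ffA_ge_chain
    intro j hj
    have := hchain (M - 1 - j) (by omega)
    rw [show t - (M - 1 - j) - 1 = t - M + j by omega,
        show t - (M - 1 - j) = t - M + j + 1 by omega] at this
    exact this
  rcases Nat.lt_or_ge M (ffA l (t - M)) with h | h
  · exfalso
    have := ffA_adj (l := l) (k := M) (x := t - M) h
    have e : t - M + M = t := by omega
    rw [e] at this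
    exact hbreak this
  · omega

-- forward length is at most the backward length at the run's other end
lemma ffA_le_ggA {l : List Int} (x : ℕ) : ffA l x ≤ ggA l (x + ffA l x) := by
  have key : ∀ k ≤ ffA l x, k ≤ ggA l (x + k) := by
    intro k
    induction k with
    | zero => intro _; omega
    | succ k ih =>
      intro hk
      have hc := ffA_adj (l := l) (k := k) (x := x) (by omega)
      have := ih (by omega)
      rw [show x + (k + 1) = x + k + 1 by omega, ggA_succ hc]
      omega
  exact key _ (le_refl _)


lemma ffA_pos_cond {l : List Int} {x : ℕ} (h : 0 < ffA l x) :
    x + 1 < l.length ∧ l.getD (x + 1) 0 = l.getD x 0 + 1 := by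
  by_contra hc
  rw [ffA_zero hc] at h
  omega

-- the list of (start, end) coordinate pairs appended by A's first loop,
-- threading the (possibly stale) 'end' value e0
def pairsOf (l : List Int) (n : ℕ) : List ℕ → ℕ → List (ℕ × ℕ)
  | [], _ => []
  | x :: xs', e0 =>
    if x < n - 1 then
      if x + ffA l x < n - 1 then
        (x, if 0 < ffA l x then x + ffA l x else e0) ::
          pairsOf l n xs' (if 0 < ffA l x then x + ffA l x else e0)
      else pairsOf l n xs' (if 0 < ffA l x then x + ffA l x else e0)
    else pairsOf l n xs' e0

lemma innerA_spec (l : List Int) : ∀ (k m start long : ℕ) (last : Int) (end_ : ℕ)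
    (cs ce : List ℕ), m + 1 + k = l.length →
    (innerA l (List.range' (m + 1) k) start long last (l.getD m 0 + 1) end_ cs ce).2.2.2 =
      (if m + ffA l m + 1 = l.length then
        ((if 0 < ffA l m then m + ffA l m else end_), cs, ce)
       else
        ((if 0 < ffA l m then m + ffA l m else end_), cs ++ [start],
         ce ++ [(if 0 < ffA l m then m + ffA l m else end_)])) := by
  intro k
  induction k with
  | zero =>
    intro m start long last end_ cs ce hn
    have hff : ffA l m = 0 := ffA_zero (by omega)
    simp [List.range', innerA, hff, hn]
  | succ k ih =>
    intro m start long last end_ cs ce hn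
    have hmn : m + 1 < l.length := by omega
    rw [show List.range' (m + 1) (k + 1) = (m + 1) :: List.range' (m + 1 + 1) k from rfl]
    rw [innerA]
    by_cases hA : l.getD (m + 1) 0 = l.getD m 0 + 1
    · rw [if_pos hA]
      have hcond : m + 1 < l.length ∧ l.getD (m + 1) 0 = l.getD m 0 + 1 := ⟨hmn, hA⟩
      have hffm : ffA l m = ffA l (m + 1) + 1 := ffA_succ hcond
      have := ih (m + 1) start (long + 1) (l.getD (m + 1) 0) (m + 1) cs ce (by omega)
      rw [show l.getD (m + 1) 0 + 1 = l.getD (m + 1 + 1 - 1) 0 + 1 by norm_num] at this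
      rw [show m + 1 + 1 - 1 = m + 1 from rfl] at this
      rw [this]
      have he : (if 0 < ffA l (m + 1) then m + 1 + ffA l (m + 1) else m + 1)
          = m + ffA l m := by
        by_cases hp : 0 < ffA l (m + 1) <;> simp [hp, hffm] <;> omega
      have hb : (m + 1 + ffA l (m + 1) + 1 = l.length) ↔ (m + ffA l m + 1 = l.length) := by
        rw [hffm]; omega
      have hpos : 0 < ffA l m := by omega
      by_cases hend : m + ffA l m + 1 = l.length
      · rw [if_pos (hb.mpr hend), if_pos hend, he]
        simp [hpos]
      · rw [if_neg (fun hx => hend (hb.mp hx)), if_neg hend, he]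
        simp [hpos]
    · rw [if_neg hA]
      have hff : ffA l m = 0 := ffA_zero (by intro hc; exact hA hc.2)
      rw [if_neg (by omega : ¬ (m + ffA l m + 1 = l.length))]
      simp [hff]

lemma outerA_spec (l : List Int) : ∀ (xs : List ℕ) (long end_ : ℕ) (cs ce : List ℕ),
    (∀ x ∈ xs, x < l.length) →
    (outerA l l.length xs long end_ cs ce).2 =
      (cs ++ (pairsOf l l.length xs end_).map Prod.fst,
       ce ++ (pairsOf l l.length xs end_).map Prod.snd) := by
  intro xs
  induction xs with
  | nil => intro long end_ cs ce _; simp [outerA, pairsOf]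
  | cons x xs' ih =>
    intro long end_ cs ce hb
    have hx : x < l.length := hb x (by simp)
    rw [outerA]
    by_cases hx1 : x < l.length - 1
    · rw [if_pos hx1]
      have hk : x + 1 + (l.length - (x + 1)) = l.length := by omega
      have hspec := innerA_spec l (l.length - (x + 1)) x x long (l.getD x 0) end_ cs ce hk
      have hlt := ffA_lt (l := l) hx
      rcases hr : innerA l (List.range' (x + 1) (l.length - (x + 1))) x long
          (l.getD x 0) (l.getD x 0 + 1) end_ cs ce with ⟨a, b, c, d, cs', ce'⟩
      rw [hr] at hspec
      simp only at hspec ⊢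
      rw [pairsOf, if_pos hx1]
      by_cases hend : x + ffA l x + 1 = l.length
      · rw [if_pos hend] at hspec
        rw [if_neg (by omega : ¬ (x + ffA l x < l.length - 1))]
        have hd : d = (if 0 < ffA l x then x + ffA l x else end_) := by
          have := congrArg (fun p => p.1) hspec; simpa using this
        have hcs : cs' = cs := by
          have := congrArg (fun p => p.2.1) hspec; simpa using this
        have hce : ce' = ce := by
          have := congrArg (fun p => p.2.2) hspec; simpa using this
        subst hd hcs hce
        exact ih _ _ _ _ (fun z hz => hb z (by simp [hz]))
      · rw [if_neg hend] at hspec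
        rw [if_pos (by omega : x + ffA l x < l.length - 1)]
        have hd : d = (if 0 < ffA l x then x + ffA l x else end_) := by
          have := congrArg (fun p => p.1) hspec; simpa using this
        have hcs : cs' = cs ++ [x] := by
          have := congrArg (fun p => p.2.1) hspec; simpa using this
        have hce : ce' = ce ++ [(if 0 < ffA l x then x + ffA l x else end_)] := by
          have := congrArg (fun p => p.2.2) hspec; simpa using this
        subst hd hcs hce
        rw [ih _ _ _ _ (fun z hz => hb z (by simp [hz]))]
        simp
    · rw [if_neg hx1, pairsOf, if_neg hx1]
      exact ih _ _ _ _ (fun z hz => hb z (by simp [hz]))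

lemma pairs_cond {l : List Int} {n : ℕ} : ∀ {xs : List ℕ} {e0 : ℕ} {p : ℕ × ℕ},
    p ∈ pairsOf l n xs e0 → p.1 < n - 1 ∧ p.1 + ffA l p.1 < n - 1 ∧ p.1 ∈ xs := by
  intro xs
  induction xs with
  | nil => intro e0 p hp; simp [pairsOf] at hp
  | cons x xs' ih =>
    intro e0 p hp
    rw [pairsOf] at hp
    by_cases h1 : x < n - 1
    · rw [if_pos h1] at hp
      by_cases h2 : x + ffA l x < n - 1
      · simp only [if_pos h2, List.mem_cons] at hp
        rcases hp with hp | hp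
        · subst hp; exact ⟨h1, h2, by simp⟩
        · have := ih hp; exact ⟨this.1, this.2.1, by simp [this.2.2]⟩
      · simp only [if_neg h2] at hp
        have := ih hp; exact ⟨this.1, this.2.1, by simp [this.2.2]⟩
    · rw [if_neg h1] at hp
      have := ih hp; exact ⟨this.1, this.2.1, by simp [this.2.2]⟩

lemma pairs_snd {l : List Int} : ∀ (k x e0 : ℕ),
    (e0 ≤ x ∨ e0 = x + ffA l x) →
    ∀ p ∈ pairsOf l l.length (List.range' x k) e0,
      p.2 ≤ p.1 ∨ (0 < ffA l p.1 ∧ p.2 = p.1 + ffA l p.1) := by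
  intro k
  induction k with
  | zero => intro x e0 _ p hp; simp [List.range', pairsOf] at hp
  | succ k ih =>
    intro x e0 hInv p hp
    rw [show List.range' x (k + 1) = x :: List.range' (x + 1) k from rfl, pairsOf] at hp
    have hInv' : ∀ e', (e' ≤ x ∨ e' = x + ffA l x) → (e' ≤ x + 1 ∨ e' = x + 1 + ffA l (x + 1)) := by
      intro e' h
      rcases h with h | h
      · left; omega
      · by_cases hf : 0 < ffA l x
        · right
          have := ffA_succ (ffA_pos_cond hf)
          omega
        · left; omega
    set e' := if 0 < ffA l x then x + ffA l x else e0 with he'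
    have hInvE : e' ≤ x ∨ e' = x + ffA l x := by
      by_cases hf : 0 < ffA l x
      · right; rw [he', if_pos hf]
      · have h0 : ffA l x = 0 := by omega
        left; rw [he', if_neg hf]
        rcases hInv with h | h
        · exact h
        · omega
    by_cases h1 : x < l.length - 1
    · rw [if_pos h1] at hp
      by_cases h2 : x + ffA l x < l.length - 1
      · simp only [if_pos h2, List.mem_cons] at hp
        rcases hp with hp | hp
        · subst hp
          by_cases hf : 0 < ffA l x
          · right; exact ⟨hf, by rw [he', if_pos hf]⟩
          · have h0 : ffA l x = 0 := by omega
            left; rw [he', if_neg hf]; rcases hInv with h | h <;> omega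
        · exact ih (x + 1) e' (hInv' e' hInvE) p hp
      · simp only [if_neg h2] at hp
        exact ih (x + 1) e' (hInv' e' hInvE) p hp
    · rw [if_neg h1] at hp
      have hff : ffA l x = 0 := ffA_zero (by intro hc; omega)
      refine ih (x + 1) e0 ?_ p hp
      rcases hInv with h | h
      · left; omega
      · left; omega

lemma pairs_split {l : List Int} {n : ℕ} {xT : ℕ}
    (hf : 0 < ffA l xT) (hg : xT + ffA l xT < n - 1) : ∀ (k x e0 : ℕ),
    x ≤ xT → xT < x + k →
    ∃ L1 L2, pairsOf l n (List.range' x k) e0 = L1 ++ (xT, xT + ffA l xT) :: L2 ∧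
      (∀ p ∈ L1, p.1 < xT) := by
  intro k
  induction k with
  | zero => intro x e0 h1 h2; omega
  | succ k ih =>
    intro x e0 h1 h2
    rw [show List.range' x (k + 1) = x :: List.range' (x + 1) k from rfl, pairsOf]
    by_cases hx : x = xT
    · subst hx
      rw [if_pos (by omega : x < n - 1), if_pos hg, if_pos hf]
      exact ⟨[], _, rfl, by simp⟩
    · have hxlt : x < xT := by omega
      by_cases hc1 : x < n - 1
      · rw [if_pos hc1]
        by_cases hc2 : x + ffA l x < n - 1
        · rw [if_pos hc2]
          obtain ⟨L1, L2, heq, hL1⟩ := ih (x + 1) _ (by omega) (by omega)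
          refine ⟨(x, if 0 < ffA l x then x + ffA l x else e0) :: L1, L2, ?_, ?_⟩
          · rw [heq]; simp
          · intro p hp
            rcases List.mem_cons.mp hp with hp | hp
            · subst hp; exact hxlt
            · exact hL1 p hp
        · rw [if_neg hc2]
          obtain ⟨L1, L2, heq, hL1⟩ := ih (x + 1) _ (by omega) (by omega)
          exact ⟨L1, L2, heq, hL1⟩
      · rw [if_neg hc1]
        obtain ⟨L1, L2, heq, hL1⟩ := ih (x + 1) _ (by omega) (by omega)
        exact ⟨L1, L2, heq, hL1⟩

-- ---- selection fold (phase 2 of A) ----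

def selGo : List Int → ℕ → (Int × ℕ) → (Int × ℕ)
  | [], _, p => p
  | v :: vs, i, p => selGo vs (i + 1) (if v > p.1 then (v, i) else p)

lemma selGo_keep : ∀ (vs : List Int) (i : ℕ) (p : Int × ℕ),
    (∀ v ∈ vs, v ≤ p.1) → selGo vs i p = p := by
  intro vs
  induction vs with
  | nil => intro i p _; rfl
  | cons v vs ih =>
    intro i p h
    rw [selGo, if_neg (by have := h v (by simp); omega)]
    exact ih (i + 1) p (fun w hw => h w (by simp [hw]))

lemma selGo_lt {V : Int} : ∀ (vs : List Int) (i : ℕ) (p : Int × ℕ),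
    p.1 < V → (∀ v ∈ vs, v < V) → (selGo vs i p).1 < V := by
  intro vs
  induction vs with
  | nil => intro i p hp _; exact hp
  | cons v vs ih =>
    intro i p hp h
    rw [selGo]
    by_cases hv : v > p.1
    · rw [if_pos hv]
      exact ih _ _ (by simpa using h v (by simp)) (fun w hw => h w (by simp [hw]))
    · rw [if_neg hv]
      exact ih _ _ hp (fun w hw => h w (by simp [hw]))

lemma selGo_append : ∀ (as bs : List Int) (i : ℕ) (p : Int × ℕ),
    selGo (as ++ bs) i p = selGo bs (i + as.length) (selGo as i p) := by
  intro as
  induction as with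
  | nil => intro bs i p; simp [selGo]
  | cons a as ih =>
    intro bs i p
    rw [List.cons_append, selGo, selGo, ih,
        show i + (a :: as).length = i + 1 + as.length by simp only [List.length_cons]; omega]

lemma selGo_ind : ∀ (vs : List Int) (i : ℕ) (p : Int × ℕ),
    (selGo vs i p).2 = p.2 ∨ (i ≤ (selGo vs i p).2 ∧ (selGo vs i p).2 < i + vs.length) := by
  intro vs
  induction vs with
  | nil => intro i p; left; rfl
  | cons v vs ih =>
    intro i p
    rw [selGo]
    by_cases hv : v > p.1
    · rw [if_pos hv]
      rcases ih (i + 1) (v, i) with h | h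
      · right
        simp only at h
        rw [h]
        simp only [List.length_cons]
        omega
      · right
        simp only [List.length_cons]
        omega
    · rw [if_neg hv]
      rcases ih (i + 1) p with h | h
      · left; exact h
      · right
        simp only [List.length_cons]
        omega

-- A's fold over List.range m.length with getD equals selGo over the list itself
lemma fold_eq_selGo (m : List Int) : ∀ (suf : List Int) (i : ℕ) (p : Int × ℕ),
    (∀ k < suf.length, m.getD (i + k) 0 = suf.getD k 0) →
    (List.range' i suf.length).foldl
      (fun p x => if m.getD x 0 > p.1 then (m.getD x 0, x) else p) p = selGo suf i p := by
  intro suf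
  induction suf with
  | nil => intro i p _; rfl
  | cons v vs ih =>
    intro i p h
    have h0 : m.getD i 0 = v := by simpa using h 0 (by simp)
    rw [show List.range' i (v :: vs).length = i :: List.range' (i + 1) vs.length from rfl]
    rw [List.foldl_cons, selGo, h0]
    exact ih (i + 1) _ (fun k hk => by
      have := h (k + 1) (by simpa using Nat.succ_lt_succ hk)
      rw [show i + 1 + k = i + (k + 1) by omega]
      simpa using this)

-- longueur over the coordinate lists is the list of pair differences
lemma longueur_eq (P : List (ℕ × ℕ)) :
    (List.range (P.map Prod.fst).length).map
      (fun x => ((P.map Prod.snd).getD x 0 : Int) - ((P.map Prod.fst).getD x 0 : Int)) =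
    P.map (fun p => (p.2 : Int) - (p.1 : Int)) := by
  apply List.ext_getElem
  · simp
  · intro i h1 h2
    simp only [List.getElem_map, List.getElem_range]
    have hi : i < P.length := by simpa using h2
    rw [List.getD_eq_getElem _ _ (by simpa using hi), List.getD_eq_getElem _ _ (by simpa using hi)]
    simp

-- the arr-building loop is a slice
lemma map_getD_range' (l : List Int) (c a : ℕ) (h : a + c ≤ l.length) :
    (List.range' a c).map (fun x => l.getD x 0) = (l.drop a).take c := by
  apply List.ext_getElem
  · simp
    omega
  · intro i h1 h2
    simp only [List.getElem_map, List.getElem_range', List.getElem_take, List.getElem_drop]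
    rw [List.getD_eq_getElem _ _ (by simp at h1; omega)]
    norm_num

-- ---- B's single pass ----

lemma ggA_zero_of_ge {l : List Int} {u : ℕ} (h : l.length ≤ u) : ggA l u = 0 := by
  cases u with
  | zero => rfl
  | succ t => exact ggA_succ_zero (by intro hc; omega)

-- B's step keeps s = x - ggA x
lemma stepB_s {l : List Int} {x : ℕ} (hx : 1 ≤ x) (hx2 : x < l.length) (s : ℕ)
    (hs : s = (x - 1) - ggA l (x - 1)) :
    (if l.getD x 0 ≠ l.getD (x - 1) 0 + 1 then x else s) = x - ggA l x := by
  by_cases hA : l.getD x 0 = l.getD (x - 1) 0 + 1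
  · rw [if_neg (by simpa using hA)]
    have hc : (x - 1) + 1 < l.length ∧ l.getD ((x - 1) + 1) 0 = l.getD (x - 1) 0 + 1 := by
      constructor
      · omega
      · rw [show x - 1 + 1 = x by omega]; exact hA
    have hgg := ggA_succ hc
    rw [show (x - 1) + 1 = x by omega] at hgg
    rw [hgg, hs]
    have := ggA_le (l := l) (x - 1)
    omega
  · rw [if_pos (by simpa using hA)]
    have h0 : ggA l x = 0 := by
      cases x with
      | zero => rfl
      | succ t =>
        apply ggA_succ_zero
        intro hc
        exact hA (by simpa using hc.2)
    omega

-- B's fold never updates the best window while the chain values stay at most the best value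
lemma B_noupdate (l : List Int) : ∀ (k x : ℕ) (st : ℕ × ℕ × ℕ), 1 ≤ x →
    x + k ≤ l.length →
    st.1 = (x - 1) - ggA l (x - 1) →
    (∀ j, x ≤ j → j < x + k → (ggA l j : Int) ≤ (st.2.2 : Int) - (st.2.1 : Int)) →
    ((List.range' x k).foldl
      (fun (st : ℕ × ℕ × ℕ) x =>
        let s := if l.getD x 0 ≠ l.getD (x - 1) 0 + 1 then x else st.1
        if (x : Int) - (s : Int) > (st.2.2 : Int) - (st.2.1 : Int) then (s, s, x) else (s, st.2))
      st).2 = st.2 := by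
  intro k
  induction k with
  | zero => intro x st _ _ _ _; rfl
  | succ k ih =>
    intro x st hx hk hs hval
    rw [show List.range' x (k + 1) = x :: List.range' (x + 1) k from rfl, List.foldl_cons]
    simp only
    rw [stepB_s hx (by omega) st.1 hs]
    have hle := ggA_le (l := l) x
    have hcast : (x : Int) - ((x - ggA l x : ℕ) : Int) = (ggA l x : Int) := by omega
    rw [if_neg (by
      rw [hcast]
      have := hval x (le_refl x) (by omega)
      omega)]
    exact ih (x + 1) (x - ggA l x, st.2) (by omega) (by omega)
      (by simp)
      (fun j hj1 hj2 => hval j (by omega) (by omega))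

-- before the first index attaining the maximum, the best value stays below it
lemma B_before (l : List Int) {V : Int} : ∀ (k x : ℕ) (st : ℕ × ℕ × ℕ), 1 ≤ x →
    x + k ≤ l.length →
    st.1 = (x - 1) - ggA l (x - 1) →
    (st.2.2 : Int) - (st.2.1 : Int) < V →
    (∀ j, x ≤ j → j < x + k → (ggA l j : Int) < V) →
    (((List.range' x k).foldl
      (fun (st : ℕ × ℕ × ℕ) x =>
        let s := if l.getD x 0 ≠ l.getD (x - 1) 0 + 1 then x else st.1
        if (x : Int) - (s : Int) > (st.2.2 : Int) - (st.2.1 : Int) then (s, s, x) else (s, st.2))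
      st).1 = (x + k - 1) - ggA l (x + k - 1)) ∧
    (((List.range' x k).foldl
      (fun (st : ℕ × ℕ × ℕ) x =>
        let s := if l.getD x 0 ≠ l.getD (x - 1) 0 + 1 then x else st.1
        if (x : Int) - (s : Int) > (st.2.2 : Int) - (st.2.1 : Int) then (s, s, x) else (s, st.2))
      st).2.2 : Int) -
    (((List.range' x k).foldl
      (fun (st : ℕ × ℕ × ℕ) x =>
        let s := if l.getD x 0 ≠ l.getD (x - 1) 0 + 1 then x else st.1
        if (x : Int) - (s : Int) > (st.2.2 : Int) - (st.2.1 : Int) then (s, s, x) else (s, st.2))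
      st).2.1 : Int) < V := by
  intro k
  induction k with
  | zero =>
    intro x st hx _ hs hv _
    constructor
    · simpa using hs
    · simpa using hv
  | succ k ih =>
    intro x st hx hk hs hv hvals
    rw [show List.range' x (k + 1) = x :: List.range' (x + 1) k from rfl, List.foldl_cons]
    simp only
    rw [stepB_s hx (by omega) st.1 hs]
    have hle := ggA_le (l := l) x
    have hcast : (x : Int) - ((x - ggA l x : ℕ) : Int) = (ggA l x : Int) := by omega
    have hgx : (ggA l x : Int) < V := hvals x (le_refl x) (by omega)
    have harg : x + 1 + k - 1 = x + k := by omega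
    by_cases hupd : (x : Int) - ((x - ggA l x : ℕ) : Int) > (st.2.2 : Int) - (st.2.1 : Int)
    · rw [if_pos hupd]
      have := ih (x + 1) (x - ggA l x, x - ggA l x, x) (by omega) (by omega)
        (by simp) (by simp; omega)
        (fun j hj1 hj2 => hvals j (by omega) (by omega))
      rw [harg] at this
      exact this
    · rw [if_neg hupd]
      have := ih (x + 1) (x - ggA l x, st.2) (by omega) (by omega)
        (by simp) (by simpa using hv)
        (fun j hj1 hj2 => hvals j (by omega) (by omega))
      rw [harg] at this
      exact this

lemma getD_mid {α : Type} : ∀ (as : List α) (b : α) (bs : List α) (d : α),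
    (as ++ b :: bs).getD as.length d = b := by
  intro as
  induction as with
  | nil => intro b bs d; rfl
  | cons a as ih => intro b bs d; simpa using ih b bs d

-- A's result re-expressed through the pair list
def Aresult (l : List Int) : List Int :=
  phase2A l ((pairsOf l l.length (List.range l.length) 0).map Prod.fst)
    ((pairsOf l l.length (List.range l.length) 0).map Prod.snd)

lemma A_eq_Aresult (l : List Int) : long_asc l = Aresult l := by
  unfold long_asc Aresult
  rcases houter : outerA l l.length (List.range l.length) 0 0 [] [] with ⟨e0, cs, ce⟩
  have hout := outerA_spec l (List.range l.length) 0 0 [] []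
    (fun x hx => List.mem_range.mp hx)
  rw [houter] at hout
  have hcs : cs = (pairsOf l l.length (List.range l.length) 0).map Prod.fst := by
    have := congrArg Prod.fst hout; simpa using this
  have hce : ce = (pairsOf l l.length (List.range l.length) 0).map Prod.snd := by
    have := congrArg Prod.snd hout; simpa using this
  rw [hcs, hce]

-- the selection fold over longueur is selGo over the pair differences
lemma selA_eq (P : List (ℕ × ℕ)) :
    selA (longueurA (P.map Prod.fst) (P.map Prod.snd)) =
      selGo (P.map (fun p => (p.2 : Int) - (p.1 : Int))) 0 (0, 0) := by
  unfold selA longueurA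
  rw [longueur_eq]
  rw [List.range_eq_range', fold_eq_selGo _ _ 0 (0, 0) (fun k hk => by simp)]

-- phase 2 in closed form
lemma phase2A_eq (l : List Int) (P : List (ℕ × ℕ)) :
    phase2A l (P.map Prod.fst) (P.map Prod.snd) =
      (List.range'
        ((P.map Prod.fst).getD (selGo (P.map (fun p => (p.2 : Int) - (p.1 : Int))) 0 (0, 0)).2 0)
        (((P.map Prod.snd).getD (selGo (P.map (fun p => (p.2 : Int) - (p.1 : Int))) 0 (0, 0)).2 0)
          + 1 -
         ((P.map Prod.fst).getD (selGo (P.map (fun p => (p.2 : Int) - (p.1 : Int))) 0 (0, 0)).2 0))).map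
        (fun x => l.getD x 0) := by
  unfold phase2A
  rw [selA_eq, PySem.List.foldl_append_singleton_eq_map, List.nil_append]

-- B's single pass yields the window (xs - M, xs) when xs is the first index attaining the
-- overall maximum M ≥ 1 of the backward chain lengths
lemma B_val (l : List Int) (xs M : ℕ) (hM : 1 ≤ M) (hxsn : xs < l.length)
    (hgg : ggA l xs = M) (hmin : ∀ u < xs, ggA l u < M) (hub : ∀ u, ggA l u ≤ M) :
    long_asc_alt l = (l.drop (xs - M)).take (M + 1) := by
  have hxs1 : 1 ≤ xs := by
    rcases Nat.eq_zero_or_pos xs with h | h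
    · subst h; simp [ggA] at hgg; omega
    · exact h
  have hggle := ggA_le (l := l) xs
  unfold long_asc_alt bestB
  have hsplit1 : List.range' 1 (l.length - 1) =
      List.range' 1 (xs - 1) ++ List.range' xs (l.length - xs) := by
    rw [show List.range' xs (l.length - xs) = List.range' (1 + (xs - 1)) (l.length - xs) by
      congr 1; omega]
    rw [List.range'_append_1]
    congr 1
    omega
  have hsplit2 : List.range' xs (l.length - xs) =
      xs :: List.range' (xs + 1) (l.length - xs - 1) := by
    rw [show l.length - xs = (l.length - xs - 1) + 1 by omega]
    rfl
  rw [hsplit1, List.foldl_append, hsplit2, List.foldl_cons]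
  dsimp only
  have hbef := B_before l (V := (M : Int)) (xs - 1) 1 (0, 0, 0) (le_refl 1) (by omega)
    (by simp) (by simp; omega)
    (fun j hj1 hj2 => by
      have := hmin j (by omega)
      omega)
  rw [show 1 + (xs - 1) - 1 = xs - 1 by omega] at hbef
  set r1 := (List.range' 1 (xs - 1)).foldl
      (fun (st : ℕ × ℕ × ℕ) x =>
        let s := if l.getD x 0 ≠ l.getD (x - 1) 0 + 1 then x else st.1
        if (x : Int) - (s : Int) > (st.2.2 : Int) - (st.2.1 : Int) then (s, s, x) else (s, st.2))
      (0, 0, 0) with hr1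
  rw [stepB_s hxs1 hxsn r1.1 hbef.1]
  rw [hgg]
  rw [if_pos (by
    have : ((xs : Int) - ((xs - M : ℕ) : Int)) = (M : Int) := by omega
    rw [this]
    exact hbef.2)]
  have hnoup := B_noupdate l (l.length - xs - 1) (xs + 1) (xs - M, xs - M, xs)
    (by omega) (by omega) (by simp [hgg])
    (fun j hj1 hj2 => by
      have := hub j
      simp only
      have : ((xs : Int) - ((xs - M : ℕ) : Int)) = (M : Int) := by omega
      omega)
  rw [hnoup]
  dsimp only
  rw [show ((xs : Int) + 1) = (((xs + 1 : ℕ) : Int)) by push_cast; ring]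
  rw [PySem.List.slice_natCast]
  congr 1
  omega

lemma pairs_ff0 {l : List Int} {n : ℕ} (hff : ∀ t, ffA l t = 0) :
    ∀ (xs : List ℕ) (e0 : ℕ),
    pairsOf l n xs e0 = (xs.filter (fun x => decide (x < n - 1))).map (fun x => (x, e0)) := by
  intro xs
  induction xs with
  | nil => intro e0; rfl
  | cons x xs' ih =>
    intro e0
    rw [pairsOf, List.filter_cons]
    by_cases h1 : x < n - 1
    · rw [if_pos h1, if_pos (by rw [hff]; exact h1), hff]
      simp only [h1, decide_true, if_pos]
      rw [List.map_cons, ih]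
      simp
    · rw [if_neg h1]
      simp only [h1, decide_false, Bool.false_eq_true, if_false]
      exact ih e0

lemma main_eq (l : List Int) (hpre : Pre_long_asc l) (hnd : ¬ D_long_asc l) :
    long_asc l = long_asc_alt l := by
  obtain ⟨tb, htb, htbne⟩ := hpre
  have hn2 : 2 ≤ l.length := by omega
  obtain ⟨t0, ht0mem, ht0max⟩ := Finset.exists_max_image (Finset.range l.length) (ggA l)
    ⟨0, Finset.mem_range.mpr (by omega)⟩
  set M := ggA l t0 with hM
  have hub : ∀ u, ggA l u ≤ M := by
    intro u
    by_cases h : u < l.length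
    · exact ht0max u (Finset.mem_range.mpr h)
    · rw [ggA_zero_of_ge (by omega)]; omega
  have hex : ∃ t, ggA l t = M := ⟨t0, rfl⟩
  have hxseq : ggA l (Nat.find hex) = M := Nat.find_spec hex
  set xs := Nat.find hex with hxs
  have hxsmin : ∀ u < xs, ggA l u < M := fun u hu =>
    lt_of_le_of_ne (hub u) (Nat.find_min hex hu)
  have hD2 : ∃ t, t < l.length - 1 ∧ ggA l (l.length - 1) ≤ ggA l t := by
    by_contra h
    push_neg at h
    refine hnd (fun t ht => ?_)
    rw [ggD_eq_ggA t (by omega), ggD_eq_ggA (l.length - 1) (by omega)]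
    exact h t ht
  obtain ⟨tw, htw, htwge⟩ := hD2
  have hxslt : xs < l.length - 1 := by
    rcases Nat.lt_or_ge t0 (l.length - 1) with h | h
    · have : xs ≤ t0 := Nat.find_min' hex rfl
      omega
    · have ht0n : t0 < l.length := Finset.mem_range.mp ht0mem
      have ht0e : t0 = l.length - 1 := by omega
      have hgtw : ggA l tw = M := le_antisymm (hub tw) (by rw [hM, ht0e]; exact htwge)
      have : xs ≤ tw := Nat.find_min' hex hgtw
      omega
  have hxsn : xs < l.length := by omega
  rw [A_eq_Aresult]
  unfold Aresult
  rw [List.range_eq_range', phase2A_eq]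
  by_cases hM0 : M = 0
  · -- all runs have length 1: A returns [l[0]], and so does B
    have hff : ∀ t, ffA l t = 0 := by
      intro t
      by_cases h : t < l.length
      · have h1 := ffA_le_ggA (l := l) t
        have h2 := hub (t + ffA l t)
        omega
      · exact ffA_zero (by intro hc; omega)
    have hP : pairsOf l l.length (List.range' 0 l.length) 0 =
        ((List.range' 0 l.length).filter (fun x => decide (x < l.length - 1))).map
          (fun x => (x, 0)) := pairs_ff0 hff _ _
    have hPeq : ∃ tl, pairsOf l l.length (List.range' 0 l.length) 0 = (0, 0) :: tl := by
      rw [hP]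
      rw [show List.range' 0 l.length = 0 :: List.range' 1 (l.length - 1) by
        rw [show l.length = (l.length - 1) + 1 by omega]; rfl]
      rw [List.filter_cons]
      simp only [show ((0 : ℕ) < l.length - 1) = True by simp; omega, decide_true, if_pos]
      exact ⟨_, rfl⟩
    obtain ⟨tl, hPeq⟩ := hPeq
    have hsel : selGo ((pairsOf l l.length (List.range' 0 l.length) 0).map
        (fun p => (p.2 : Int) - (p.1 : Int))) 0 (0, 0) = (0, 0) := by
      apply selGo_keep
      intro v hv
      obtain ⟨p, hp, hpd⟩ := List.mem_map.mp hv
      rw [hP] at hp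
      obtain ⟨x, _, hx⟩ := List.mem_map.mp hp
      rw [← hx] at hpd
      simp only at hpd
      simp only [← hpd]
      omega
    rw [hsel, hPeq]
    simp only [List.map_cons, List.getD_cons_zero]
    rw [show (0 : ℕ) + 1 - 0 = 1 from rfl]
    -- A's value is [l[0]]
    have hA : (List.range' 0 1).map (fun x => l.getD x 0) = l.take 1 := by
      rw [map_getD_range' l 1 0 (by omega)]
      simp
    rw [hA]
    -- B never updates the best window
    unfold long_asc_alt bestB
    have hnoup := B_noupdate l (l.length - 1) 1 (0, 0, 0) (le_refl 1) (by omega) (by simp)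
      (fun j hj1 hj2 => by
        have := hub j
        simp only
        omega)
    rw [hnoup]
    dsimp only
    rw [show (((0 : ℕ) : Int) + 1) = ((1 : ℕ) : Int) by norm_num, PySem.List.slice_natCast]
    simp
  · -- there is a run of length ≥ 2; both return the first longest one
    have hM1 : 1 ≤ M := by omega
    have hMle : M ≤ xs := hxseq ▸ ggA_le (l := l) xs
    have hbreak : ¬ (xs + 1 < l.length ∧ l.getD (xs + 1) 0 = l.getD xs 0 + 1) := by
      intro hc
      have h1 := ggA_succ hc
      have h2 := hub (xs + 1)
      omega
    have hffT : ffA l (xs - M) = M := by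
      have h := ffA_of_break (l := l) (t := xs) hbreak
      rw [hxseq] at h
      exact h
    obtain ⟨L1, L2, hPsplit, hL1⟩ := pairs_split (l := l) (n := l.length) (xT := xs - M)
      (by rw [hffT]; omega) (by rw [hffT]; omega) l.length 0 0 (by omega) (by omega)
    rw [hffT] at hPsplit
    rw [show xs - M + M = xs by omega] at hPsplit
    -- the difference list
    have hmap : (pairsOf l l.length (List.range' 0 l.length) 0).map
        (fun p => (p.2 : Int) - (p.1 : Int)) =
        L1.map (fun p => (p.2 : Int) - (p.1 : Int)) ++ (M : Int) ::
        L2.map (fun p => (p.2 : Int) - (p.1 : Int)) := by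
      rw [hPsplit, List.map_append, List.map_cons]
      congr 2
      simp only
      omega
    -- bound on every pair difference
    have hdle : ∀ p ∈ pairsOf l l.length (List.range' 0 l.length) 0,
        (p.2 : Int) - (p.1 : Int) ≤ (M : Int) := by
      intro p hp
      rcases pairs_snd l.length 0 0 (Or.inl (le_refl 0)) p hp with h | ⟨hf, h⟩
      · omega
      · have h1 := ffA_le_ggA (l := l) p.1
        have h2 := hub (p.1 + ffA l p.1)
        omega
    -- pairs before the winner are strictly shorter
    have hdlt : ∀ p ∈ L1, (p.2 : Int) - (p.1 : Int) < (M : Int) := by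
      intro p hp
      have hpP : p ∈ pairsOf l l.length (List.range' 0 l.length) 0 := by
        rw [hPsplit]; exact List.mem_append_left _ hp
      rcases pairs_snd l.length 0 0 (Or.inl (le_refl 0)) p hpP with h | ⟨hf, h⟩
      · omega
      · have h1 := ffA_le_ggA (l := l) p.1
        have h2 := hub (p.1 + ffA l p.1)
        have hplt := hL1 p hp
        by_cases hEq : ffA l p.1 = M
        · exfalso
          have hgge : ggA l (p.1 + ffA l p.1) = M := by omega
          have := hxsmin (p.1 + ffA l p.1)
          by_cases hlt : p.1 + ffA l p.1 < xs
          · have := this hlt; omega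
          · omega
        · omega
    -- compute the selection
    have hsel : selGo ((pairsOf l l.length (List.range' 0 l.length) 0).map
        (fun p => (p.2 : Int) - (p.1 : Int))) 0 (0, 0) = ((M : Int), L1.length) := by
      rw [hmap, selGo_append]
      have hp1 : (selGo (L1.map (fun p => (p.2 : Int) - (p.1 : Int))) 0 (0, 0)).1 < (M : Int) := by
        apply selGo_lt _ _ _ (by simp; omega)
        intro v hv
        obtain ⟨p, hp, hpd⟩ := List.mem_map.mp hv
        rw [← hpd]
        exact hdlt p hp
      rw [selGo]
      rw [if_pos hp1]
      rw [selGo_keep]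
      · simp
      · intro v hv
        obtain ⟨p, hp, hpd⟩ := List.mem_map.mp hv
        rw [← hpd]
        simp only
        apply hdle
        rw [hPsplit]
        exact List.mem_append_right _ (List.mem_cons_of_mem _ hp)
    rw [hsel]
    simp only
    rw [hPsplit, List.map_append, List.map_cons, List.map_append, List.map_cons]
    rw [show L1.length = (L1.map Prod.fst).length by simp, getD_mid]
    rw [show (L1.map Prod.fst).length = (L1.map Prod.snd).length by simp, getD_mid]
    simp only
    rw [map_getD_range' l (xs + 1 - (xs - M)) (xs - M) (by omega)]
    rw [B_val l xs M hM1 hxsn hxseq hxsmin hub]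
    congr 1
    omega

lemma tight_lemma (l : List Int) (hpre : Pre_long_asc l) (hD : D_long_asc l) :
    long_asc l ≠ long_asc_alt l := by
  obtain ⟨tb, htb, htbne⟩ := hpre
  have hn2 : 2 ≤ l.length := by omega
  have hDall : ∀ t < l.length - 1, ggA l t < ggA l (l.length - 1) := by
    intro t ht
    have := hD t ht
    rwa [ggD_eq_ggA t (by omega), ggD_eq_ggA (l.length - 1) (by omega)] at this
  set M0 := ggA l (l.length - 1) with hM0def
  have hM01 : 1 ≤ M0 := by have := hDall tb htb; omega
  have hMle : M0 ≤ l.length - 1 := hM0def ▸ ggA_le (l := l) (l.length - 1)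
  have hub : ∀ u, ggA l u ≤ M0 := by
    intro u
    by_cases h1 : u < l.length - 1
    · have := hDall u h1; omega
    · by_cases h2 : u = l.length - 1
      · rw [h2]
      · rw [ggA_zero_of_ge (by omega)]; omega
  have hB := B_val l (l.length - 1) M0 hM01 (by omega) rfl hDall hub
  have hBlen : (long_asc_alt l).length = M0 + 1 := by
    rw [hB]
    simp only [List.length_take, List.length_drop]
    omega
  have hbreak0 : ffA l 0 < l.length - 1 := by
    by_contra h
    have := (ffA_adj (l := l) (k := tb) (x := 0) (by omega)).2
    simp only [Nat.zero_add] at this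
    exact htbne this
  have hA := A_eq_Aresult l
  unfold Aresult at hA
  rw [List.range_eq_range', phase2A_eq] at hA
  set P := pairsOf l l.length (List.range' 0 l.length) 0 with hPdef
  set sel := selGo (P.map (fun p => (p.2 : Int) - (p.1 : Int))) 0 (0, 0) with hseldef
  have hPcons : ∃ e tl, P = (0, e) :: tl := by
    rw [hPdef, show List.range' 0 l.length = 0 :: List.range' 1 (l.length - 1) by
      rw [show l.length = (l.length - 1) + 1 by omega]; rfl]
    rw [pairsOf, if_pos (by omega : (0 : ℕ) < l.length - 1),
        if_pos (by simpa using hbreak0)]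
    exact ⟨_, _, rfl⟩
  obtain ⟨eh, tl, hPc⟩ := hPcons
  have hPlen : 1 ≤ P.length := by rw [hPc]; simp
  have hind : sel.2 < P.length := by
    rcases selGo_ind (P.map (fun p => (p.2 : Int) - (p.1 : Int))) 0 (0, 0) with h | h
    · rw [hseldef, h]; omega
    · rw [hseldef]
      have := h.2
      simpa using this
  have hstart : (P.map Prod.fst).getD sel.2 0 = (P[sel.2]'hind).1 := by
    rw [List.getD_eq_getElem _ _ (by simpa using hind)]
    simp
  have hend : (P.map Prod.snd).getD sel.2 0 = (P[sel.2]'hind).2 := by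
    rw [List.getD_eq_getElem _ _ (by simpa using hind)]
    simp
  have hpcmem : P[sel.2]'hind ∈ P := List.getElem_mem hind
  have hpcmem' : P[sel.2]'hind ∈ pairsOf l l.length (List.range' 0 l.length) 0 := by
    exact hpcmem
  have hc : (P[sel.2]'hind).2 + 1 - (P[sel.2]'hind).1 ≤ M0 := by
    rcases pairs_snd l.length 0 0 (Or.inl (le_refl 0)) _ hpcmem' with h | ⟨hf, h⟩
    · omega
    · have h2 := (pairs_cond hpcmem').2.1
      have h3 := ffA_le_ggA (l := l) (P[sel.2]'hind).1
      have h4 := hDall _ h2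
      omega
  have hAlen : (long_asc l).length = (P[sel.2]'hind).2 + 1 - (P[sel.2]'hind).1 := by
    rw [hA, hstart, hend]
    simp
  intro hEq
  rw [hEq, hBlen] at hAlen
  omega

-- ===== VERDICT (by name: the statement is the Claim_ definition above) =====
theorem long_asc_spec : Claim_unchanged_long_asc :=
  fun l _ hpre hnd => main_eq l hpre hnd
theorem long_asc_changed : Claim_changed_long_asc := by
  unfold Claim_changed_long_asc; decide
theorem long_asc_tight : Claim_exact_long_asc :=
  fun l _ hpre hD => tight_lemma l hpre hD
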